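-- pv_equiv track=rewrite | github.com/Azure/azure-sdk-for-python | tools/azure-sdk-tools/ci_tools/conda/conda_functions.py | get_manifest_includes
-- ===== SOURCE A (Python) =====
-- def get_manifest_includes(common_root):
--     """
--     Given a common root, generate the folder structure and __init__.py necessary to support it.
--     """
--     levels = common_root.split("/")
--     breadcrumbs = []
--     breadcrumb_string = ""
--
--     for ns in levels:
--         breadcrumb_string += ns + "/"
--         breadcrumbs.append(breadcrumb_string + "__init__.py")
--
--     return breadcrumbs
-- ===== SOURCE B (Python) =====
-- def get_manifest_includes(common_root):
--     """
--     Given a common root, generate the folder structure and __init__.py necessary to support it.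
--     """
--     levels = common_root.split("/")
--     return ["/".join(levels[:i + 1]) + "/__init__.py" for i in range(len(levels))]
-- ===== Notes on version B (the rewrite author's own statement) =====
-- stated objective: simpler
-- what changed: Drops the running breadcrumb-string accumulator loop and instead computes each breadcrumb independently as the slash-join of a prefix slice of the split levels, via a comprehension.
import Mathlib
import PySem

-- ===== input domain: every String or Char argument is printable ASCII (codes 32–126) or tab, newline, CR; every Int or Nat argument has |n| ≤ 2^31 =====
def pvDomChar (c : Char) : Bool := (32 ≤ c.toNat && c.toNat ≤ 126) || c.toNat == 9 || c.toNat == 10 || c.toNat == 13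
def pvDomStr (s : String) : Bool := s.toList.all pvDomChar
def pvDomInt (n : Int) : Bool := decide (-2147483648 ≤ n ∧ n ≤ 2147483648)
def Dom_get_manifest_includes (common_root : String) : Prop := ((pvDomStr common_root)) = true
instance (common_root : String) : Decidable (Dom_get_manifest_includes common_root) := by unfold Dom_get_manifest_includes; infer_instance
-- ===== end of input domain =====

-- B replaces A's running breadcrumb-string accumulator with a comprehension that re-joins a
-- prefix slice of the split levels for each position (objective: simpler decomposition).

-- ===== PORT A =====
def get_manifest_includes (common_root : String) : List String :=
  let levels : List String := (PySem.Chars.splitOn common_root.toList "/".toList).map String.ofList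
  (levels.foldl
    (fun (st : String × List String) ns =>
      let bc := st.1 ++ (ns ++ "/")
      (bc, st.2 ++ [bc ++ "__init__.py"]))
    ("", [])).2

-- ===== PORT B =====
def get_manifest_includes_alt (common_root : String) : List String :=
  let levels : List String := (PySem.Chars.splitOn common_root.toList "/".toList).map String.ofList
  (List.range levels.length).map
    (fun i => PySem.Str.join "/" (levels.take (i + 1)) ++ "/__init__.py")

-- ===== PRECONDITION & SPEC =====
def Spec_get_manifest_includes (common_root : String) (out : List String) : Prop := out = get_manifest_includes_alt common_root
instance (common_root : String) (out : List String) : Decidable (Spec_get_manifest_includes common_root out) := by unfold Spec_get_manifest_includes; infer_instance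

-- ===== CLAIM (what is proved, stated in full; the proofs are below) =====
def Claim_equal_get_manifest_includes : Prop := ∀ (common_root : String), Dom_get_manifest_includes common_root → Spec_get_manifest_includes common_root (get_manifest_includes common_root)

-- ===== LEMMAS AND PROOFS =====

-- '/'.join over a nonempty-tailed cons, at String level
theorem join_cons_of_ne_nil (x : String) (xs : List String) (h : xs ≠ []) :
    PySem.Str.join "/" (x :: xs) = x ++ ("/" ++ PySem.Str.join "/" xs) := by
  cases xs with
  | nil => exact absurd rfl h
  | cons q rest =>
    apply String.toList_inj.mp
    simp [PySem.Str.toList_join, PySem.Chars.join_cons_cons]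

-- A's loop from an arbitrary state equals B's per-index re-join, shifted by the pending breadcrumb
theorem loop_eq (ls : List String) : ∀ (bc : String) (acc : List String),
    (ls.foldl
      (fun (st : String × List String) ns =>
        let b := st.1 ++ (ns ++ "/")
        (b, st.2 ++ [b ++ "__init__.py"]))
      (bc, acc)).2
    = acc ++ (List.range ls.length).map
        (fun i => (bc ++ PySem.Str.join "/" (ls.take (i + 1))) ++ "/__init__.py") := by
  induction ls with
  | nil => intro bc acc; simp
  | cons ns ls' ih =>
    intro bc acc
    simp only [List.foldl_cons]
    rw [ih]
    rw [List.length_cons, List.range_succ_eq_map, List.map_cons, List.map_map]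
    have head : (bc ++ (ns ++ "/")) ++ "__init__.py"
        = (bc ++ PySem.Str.join "/" ((ns :: ls').take 1)) ++ "/__init__.py" := by
      apply String.toList_inj.mp
      simp [PySem.Str.toList_join, PySem.Chars.join_singleton]
    have tail : ∀ i ∈ List.range ls'.length,
        ((bc ++ (ns ++ "/")) ++ PySem.Str.join "/" (ls'.take (i + 1))) ++ "/__init__.py"
        = (bc ++ PySem.Str.join "/" ((ns :: ls').take (Nat.succ i + 1))) ++ "/__init__.py" := by
      intro i hi
      rw [List.mem_range] at hi
      have hne : ls'.take (i + 1) ≠ [] := by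
        apply List.ne_nil_of_length_pos
        rw [List.length_take]
        omega
      rw [List.take_succ_cons, join_cons_of_ne_nil ns _ hne]
      apply String.toList_inj.mp
      simp
    rw [List.map_congr_left tail]
    simp [head]

-- ===== VERDICT (by name: the statement is the Claim_ definition above) =====
theorem get_manifest_includes_spec : Claim_equal_get_manifest_includes := by
  intro common_root _
  unfold Spec_get_manifest_includes get_manifest_includes get_manifest_includes_alt
  simp only []
  rw [loop_eq]
  simp
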